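-- pv_equiv track=rewrite | github.com/realmadsci/rrod-proxy | rrod_proxy.py | _compute_length
-- ===== SOURCE A (Python) =====
-- def _compute_length(data):
--     i = 0
--     shift = 0
--     length = 0
--
--     while len(data) > i:
--         d = data[i]
--         length |= (d & 0x7F) << shift
--         shift += 7
--         i += 1
--         if not (d & 0x80):
--             return (i, length)
--
--     return (0, 0)
-- ===== SOURCE B (Python) =====
-- def _compute_length(data):
--     # Pass 1: find the first terminating byte (high bit clear).
--     j = next((i for i, d in enumerate(data) if not d & 0x80), None)
--     if j is None:
--         return (0, 0)
--     # Pass 2: Horner reconstruction over the prefix, back to front.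
--     length = 0
--     for d in reversed(data[:j + 1]):
--         length = (length << 7) | (d & 0x7F)
--     return (j + 1, length)
-- ===== Notes on version B (the rewrite author's own statement) =====
-- stated objective: alternative
-- what changed: Replaces A's single interleaved accumulate-and-test loop (or-ing shifted chunks little-endian as it scans) with two separate passes: first find the index of the terminating byte (high bit clear), then rebuild the length by a back-to-front Horner fold '(acc << 7) | (d & 0x7F)' over that prefix.
import Mathlib
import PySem

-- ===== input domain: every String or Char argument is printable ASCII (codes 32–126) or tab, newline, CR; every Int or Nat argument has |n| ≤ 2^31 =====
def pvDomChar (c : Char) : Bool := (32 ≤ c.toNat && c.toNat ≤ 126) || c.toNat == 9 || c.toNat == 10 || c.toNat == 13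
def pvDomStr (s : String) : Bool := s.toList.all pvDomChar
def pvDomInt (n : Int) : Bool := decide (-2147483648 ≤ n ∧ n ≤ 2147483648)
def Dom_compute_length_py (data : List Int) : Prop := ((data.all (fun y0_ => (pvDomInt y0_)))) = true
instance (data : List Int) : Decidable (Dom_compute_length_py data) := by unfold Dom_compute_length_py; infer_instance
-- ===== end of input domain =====

-- B replaces A's single interleaved accumulate-and-test loop by a terminator-finding scan
-- followed by a back-to-front Horner reconstruction over the found prefix (objective: alternative).

-- ===== PORT A =====
-- A's while-loop over data[i], carrying (i, shift, length); the remaining suffix data[i:] drives the recursion.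
def pvLoopA : List Int → Nat → Nat → Int → Int × Int
  | [], _, _, _ => (0, 0)
  | d :: rest, i, shift, length =>
    let length' := PySem.Int.bor length ((PySem.Int.band d 127) <<< shift)
    if PySem.Int.band d 128 == 0 then (((i + 1 : Nat) : Int), length')
    else pvLoopA rest (i + 1) (shift + 7) length'

def compute_length_py (data : List Int) : Int × Int := pvLoopA data 0 0 0

-- ===== PORT B =====
-- length = (length << 7) | (d & 0x7F)
def pvHornerB (acc d : Int) : Int := PySem.Int.bor (acc <<< (7 : Nat)) (PySem.Int.band d 127)

-- next((i for i, d in enumerate(data) if not d & 0x80), None) is findIdx?;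
-- data[:j+1] with 0 ≤ j+1 is exactly List.take (j+1); 'for d in reversed(...)' is foldl over the reverse.
def compute_length_py_alt (data : List Int) : Int × Int :=
  match data.findIdx? (fun d => PySem.Int.band d 128 == 0) with
  | none => (0, 0)
  | some j => (((j + 1 : Nat) : Int), ((data.take (j + 1)).reverse).foldl pvHornerB 0)

-- ===== PRECONDITION & SPEC =====
def Spec_compute_length_py (data : List Int) (out : Int × Int) : Prop := out = compute_length_py_alt data
instance (data : List Int) (out : Int × Int) : Decidable (Spec_compute_length_py data out) := by unfold Spec_compute_length_py; infer_instance

-- ===== CLAIM (what is proved, stated in full; the proofs are below) =====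
def Claim_equal_compute_length_py : Prop := ∀ (data : List Int), Dom_compute_length_py data → Spec_compute_length_py data (compute_length_py data)

-- ===== LEMMAS AND PROOFS =====

-- little-endian value of a prefix, in the foldr form B's reversed foldl computes
def pvH (p : List Int) : Int := p.foldr (fun d acc => PySem.Int.bor (acc <<< (7 : Nat)) (PySem.Int.band d 127)) 0

theorem pvH_eq_foldr (p : List Int) : p.foldr (fun x y => pvHornerB y x) 0 = pvH p := rfl

theorem pv_band127_nonneg (d : Int) : 0 ≤ PySem.Int.band d 127 := by
  rw [PySem.Int.band_comm]
  exact PySem.Int.band_nonneg_of_nonneg_left d (by norm_num)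

theorem pv_shiftLeft_nonneg (x : Int) (n : Nat) (hx : 0 ≤ x) : 0 ≤ x <<< n := by
  rw [Int.shiftLeft_eq]; positivity

theorem pv_bor_nonneg (a b : Int) (ha : 0 ≤ a) (hb : 0 ≤ b) : 0 ≤ PySem.Int.bor a b := by
  rw [PySem.Int.bor_of_nonneg ha hb]; exact Int.natCast_nonneg _

theorem pv_cast_shiftLeft (a n : Nat) : ((a : Int) <<< n) = ((a <<< n : Nat) : Int) := by
  rw [Int.shiftLeft_eq, Nat.shiftLeft_eq]; push_cast; ring

theorem pv_zero_bor (a : Int) : PySem.Int.bor 0 a = a := by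
  rw [PySem.Int.bor_comm]; exact PySem.Int.bor_zero a

theorem pv_cast_bor (a b : Nat) : PySem.Int.bor (a : Int) (b : Int) = ((a ||| b : Nat) : Int) := by
  rw [PySem.Int.bor_of_nonneg (Int.natCast_nonneg a) (Int.natCast_nonneg b)]
  simp

theorem pvH_cons (d : Int) (r : List Int) :
    pvH (d :: r) = PySem.Int.bor ((pvH r) <<< (7 : Nat)) (PySem.Int.band d 127) := rfl

theorem pvH_nonneg (p : List Int) : 0 ≤ pvH p := by
  induction p with
  | nil => simp [pvH]
  | cons d r ih =>
    rw [pvH_cons]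
    exact pv_bor_nonneg _ _ (pv_shiftLeft_nonneg (pvH r) 7 ih) (pv_band127_nonneg d)

theorem pvH_singleton (d : Int) : pvH [d] = PySem.Int.band d 127 := by
  simp only [pvH, List.foldr_cons, List.foldr_nil]
  norm_num [pv_zero_bor]

-- the accumulator-shuffling identity behind the equivalence, on nonneg values, via Nat bitwise algebra
theorem pv_alg (l c h : Int) (s : Nat) (hl : 0 ≤ l) (hc : 0 ≤ c) (hh : 0 ≤ h) :
    PySem.Int.bor (PySem.Int.bor l (c <<< s)) (h <<< (s + 7)) =
      PySem.Int.bor l ((PySem.Int.bor (h <<< (7 : Nat)) c) <<< s) := by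
  obtain ⟨a, rfl⟩ := Int.eq_ofNat_of_zero_le hl
  obtain ⟨b, rfl⟩ := Int.eq_ofNat_of_zero_le hc
  obtain ⟨e, rfl⟩ := Int.eq_ofNat_of_zero_le hh
  simp only [pv_cast_shiftLeft, pv_cast_bor, Int.natCast_inj]
  rw [Nat.shiftLeft_or_distrib, Nat.lor_assoc, show s + 7 = 7 + s from Nat.add_comm s 7,
    Nat.shiftLeft_add]
  rw [Nat.lor_comm (b <<< s) (e <<< 7 <<< s)]

theorem pv_key (data : List Int) : ∀ (i s : Nat) (l : Int), 0 ≤ l →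
    pvLoopA data i s l =
      match data.findIdx? (fun d => PySem.Int.band d 128 == 0) with
      | none => (0, 0)
      | some j => (((i + j + 1 : Nat) : Int), PySem.Int.bor l ((pvH (data.take (j + 1))) <<< s)) := by
  induction data with
  | nil => intro i s l _; simp [pvLoopA]
  | cons d rest ih =>
    intro i s l hl
    rw [pvLoopA]
    by_cases hp : (PySem.Int.band d 128 == 0) = true
    · simp only [hp, if_pos, List.findIdx?_cons, Nat.zero_add]
      simp [pvH_singleton]
    · have hl' : 0 ≤ PySem.Int.bor l ((PySem.Int.band d 127) <<< s) :=
        pv_bor_nonneg _ _ hl (pv_shiftLeft_nonneg _ _ (pv_band127_nonneg d))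
      rw [if_neg (by simpa using hp), ih (i + 1) (s + 7) _ hl']
      rw [List.findIdx?_cons, if_neg (by simpa using hp)]
      cases hfind : rest.findIdx? (fun d => PySem.Int.band d 128 == 0) with
      | none => simp
      | some j =>
        simp only [Option.map_some]
        have h1 : i + 1 + j + 1 = i + (j + 1) + 1 := by omega
        have h2 : (d :: rest).take (j + 1 + 1) = d :: rest.take (j + 1) := rfl
        rw [h1, h2]
        rw [pvH_cons, pv_alg l (PySem.Int.band d 127) (pvH (rest.take (j + 1))) s hl
          (pv_band127_nonneg d) (pvH_nonneg _)]

-- ===== VERDICT (by name: the statement is the Claim_ definition above) =====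
theorem compute_length_py_spec : Claim_equal_compute_length_py := by
  intro data _
  unfold Spec_compute_length_py compute_length_py compute_length_py_alt
  rw [pv_key data 0 0 0 le_rfl]
  cases h : data.findIdx? (fun d => PySem.Int.band d 128 == 0) with
  | none => rfl
  | some j =>
    simp [List.foldl_reverse, pvH_eq_foldr, pv_zero_bor]
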